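-- pv_equiv track=rewrite | github.com/googlefonts/ufo2ft | Lib/ufo2ft/featureWriters/kernFeatureWriter.py | mergeScripts
-- ===== SOURCE A (Python) =====
-- def mergeScripts(kerningPerScript):
--     """Merge buckets that have common scripts. If we have [A, B], [B, C], and
--     [D] buckets, we want to merge the first two into [A, B, C] and leave [D] so
--     that all kerning pairs of the three scripts are in the same lookup."""
--     sets = [set(scripts) for scripts in kerningPerScript if scripts]
--     merged = True
--     while merged:
--         merged = False
--         result = []
--         while sets:
--             common, rest = sets[0], sets[1:]
--             sets = []
--             for scripts in rest:
--                 if scripts.isdisjoint(common):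
--                     sets.append(scripts)
--                 else:
--                     merged = True
--                     common |= scripts
--             result.append(common)
--         sets = result
--
--     # Now that we have merged all common-script buckets, we need to re-assign
--     # the kerning pairs to the new buckets.
--     result = {tuple(sorted(scripts)): [] for scripts in sets}
--     for scripts, pairs in kerningPerScript.items():
--         for scripts2 in sets:
--             if scripts2 & set(scripts):
--                 result[tuple(sorted(scripts2))].extend(pairs)
--                 break
--         else:
--             # Shouldn't happen, but just in case.
--             raise AssertionError
--     return result
-- ===== SOURCE B (Python) =====
-- def mergeScripts(kerningPerScript):
--     # Incremental connected components: fold each script set into a list of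
--     # pairwise-disjoint components (one pass over the input, no fixpoint
--     # iteration), then reassign pairs via a script->key index built once.
--     comps = []
--     for scripts in kerningPerScript:
--         if not scripts:
--             continue
--         new = set(scripts)
--         for i, c in enumerate(comps):
--             if not c.isdisjoint(new):
--                 # merge the run of later components now connected through c|new
--                 c |= new
--                 kept = comps[:i + 1]
--                 for d in comps[i + 1:]:
--                     if d.isdisjoint(c):
--                         kept.append(d)
--                     else:
--                         c |= d
--                 comps = kept
--                 break
--         else:
--             comps.append(new)
--     result = {}
--     owner = {}
--     for c in comps:
--         key = tuple(sorted(c))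
--         result[key] = []
--         for s in c:
--             owner[s] = key
--     for scripts, pairs in kerningPerScript.items():
--         result[owner[scripts[0]]].extend(pairs)
--     return result
-- ===== Notes on version B (the rewrite author's own statement) =====
-- stated objective: faster
-- what changed: B replaces A's repeated global merge passes (a while-merged fixpoint over the whole bucket list) with a single left-to-right fold that maintains pairwise-disjoint connected components, merging each new script set into the first component it meets, and replaces A's per-entry scan over all buckets with one O(1) lookup in a script->bucket-key dictionary built once.
import Mathlib
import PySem

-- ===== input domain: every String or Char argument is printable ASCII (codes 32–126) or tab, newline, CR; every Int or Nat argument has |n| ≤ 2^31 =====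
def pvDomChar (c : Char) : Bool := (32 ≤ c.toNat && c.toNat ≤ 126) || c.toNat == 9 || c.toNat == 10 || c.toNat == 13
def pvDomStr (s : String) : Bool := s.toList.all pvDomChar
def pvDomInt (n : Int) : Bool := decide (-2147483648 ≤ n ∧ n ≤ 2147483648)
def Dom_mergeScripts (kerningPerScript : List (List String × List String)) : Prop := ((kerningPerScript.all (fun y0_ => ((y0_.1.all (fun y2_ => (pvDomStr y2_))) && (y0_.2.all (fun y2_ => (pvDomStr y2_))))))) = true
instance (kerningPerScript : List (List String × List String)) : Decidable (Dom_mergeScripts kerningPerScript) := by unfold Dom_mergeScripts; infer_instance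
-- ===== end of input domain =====

-- B folds each script set once into a list of pairwise-disjoint components (incremental
-- connected components, no fixpoint iteration over the whole bucket list) and reassigns
-- kerning pairs through a script→bucket-key dictionary built once, instead of A's repeated
-- global merge passes and per-entry scans over all buckets.

-- ===== PORT A =====
-- inner `for scripts in rest` loop of A's merge pass (structural recursion over `rest`;
-- state: growing `common`, kept buckets, `merged` flag)
def absorbA : List String → List (List String) → List String × List (List String) × Bool
  | common, [] => (common, [], false)
  | common, scripts :: rest =>
    if PySem.Set.isdisjoint scripts common then
      let r := absorbA common rest
      (r.1, scripts :: r.2.1, r.2.2)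
    else
      let r := absorbA (PySem.Set.union common scripts) rest
      (r.1, r.2.1, true)

theorem absorbA_kept_le (common : List String) (rest : List (List String)) :
    (absorbA common rest).2.1.length ≤ rest.length := by
  induction rest generalizing common with
  | nil => simp [absorbA]
  | cons s rest ih =>
    simp only [absorbA]
    split
    · simpa using ih common
    · exact Nat.le_succ_of_le (ih _)

-- A's inner `while sets:` loop (one full merge pass; returns new bucket list and `merged`)
def innerA (sets : List (List String)) : List (List String) × Bool :=
  match sets with
  | [] => ([], false)
  | common :: rest =>
    let a := absorbA common rest
    let r := innerA a.2.1
    (a.1 :: r.1, a.2.2 || r.2)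
termination_by sets.length
decreasing_by simp only [List.length_cons]; exact Nat.lt_succ_of_le (absorbA_kept_le _ _)

theorem absorbA_flag_lt (common : List String) (rest : List (List String))
    (h : (absorbA common rest).2.2 = true) : (absorbA common rest).2.1.length < rest.length := by
  induction rest generalizing common with
  | nil => simp [absorbA] at h
  | cons s rest ih =>
    by_cases hd : PySem.Set.isdisjoint s common = true
    · simp only [absorbA, if_pos hd, List.length_cons] at h ⊢
      exact Nat.succ_lt_succ (ih common h)
    · simp only [absorbA, if_neg hd, List.length_cons] at h ⊢
      exact Nat.lt_succ_of_le (absorbA_kept_le _ _)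

theorem innerA_len_le (sets : List (List String)) : (innerA sets).1.length ≤ sets.length := by
  induction sets using innerA.induct with
  | case1 => simp [innerA]
  | case2 common rest a ih =>
    rw [innerA]
    simp only [List.length_cons]
    exact Nat.succ_le_succ (le_trans ih (absorbA_kept_le _ _))

theorem innerA_flag_lt (sets : List (List String)) (h : (innerA sets).2 = true) :
    (innerA sets).1.length < sets.length := by
  induction sets using innerA.induct with
  | case1 => simp [innerA] at h
  | case2 common rest a ih =>
    rw [innerA] at h ⊢
    simp only [Bool.or_eq_true] at h
    simp only [List.length_cons]
    rcases h with h | h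
    · exact Nat.succ_le_succ (lt_of_le_of_lt (innerA_len_le _) (absorbA_flag_lt _ _ h))
    · exact Nat.succ_le_succ (lt_of_lt_of_le (ih h) (absorbA_kept_le _ _))

-- A's outer `while merged:` loop
def loopA (sets : List (List String)) : List (List String) :=
  let p := innerA sets
  if h : p.2 = true then loopA p.1 else p.1
termination_by sets.length
decreasing_by exact innerA_flag_lt _ h

-- A's `for scripts2 in sets: if scripts2 & set(scripts): … break` (first intersecting bucket's key)
def findA : List (List String) → List String → Option (List String)
  | [], _ => none
  | scripts2 :: rest, scripts =>
    if (PySem.Set.inter scripts2 (PySem.Set.ofList scripts)).isEmpty then findA rest scripts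
    else some (PySem.List.sorted scripts2 (fun x => x))

def mergeScripts (kerningPerScript : List (List String × List String)) : List (List String × List String) :=
  let sets := loopA (kerningPerScript.filterMap
    (fun e => if e.1.isEmpty then none else some (PySem.Set.ofList e.1)))
  let result0 : PySem.Dict (List String) (List String) :=
    sets.foldl (fun d scripts => d.insert (PySem.List.sorted scripts (fun x => x)) []) PySem.Dict.empty
  let result := kerningPerScript.foldl (fun d e =>
    match findA sets e.1 with
    | some key => d.modify key [] (fun v => v ++ e.2)
    | none => d) result0    -- Python: `raise AssertionError` (no bucket intersects; outside Pre_)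
  result.items

-- ===== PORT B =====
-- B's inner `for d in comps[i+1:]` loop: absorb every later component connected to `acc`,
-- keep the disjoint ones (in order) after it
def mergeRun : List String → List (List String) → List String × List (List String)
  | acc, [] => (acc, [])
  | acc, d :: ds =>
    if PySem.Set.isdisjoint d acc then
      let r := mergeRun acc ds
      (r.1, d :: r.2)
    else
      mergeRun (PySem.Set.union acc d) ds

-- B's `for i, c in enumerate(comps)` scan: first component meeting `new` absorbs it
-- (and the run of later components now connected); otherwise `new` is appended
def addB : List (List String) → List String → List (List String)
  | [], new => [new]
  | c :: cs, new =>
    if PySem.Set.isdisjoint c new then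
      c :: addB cs new
    else
      let r := mergeRun (PySem.Set.union c new) cs
      r.1 :: r.2

def mergeScripts_alt (kerningPerScript : List (List String × List String)) : List (List String × List String) :=
  let comps := kerningPerScript.foldl
    (fun comps e => if e.1.isEmpty then comps else addB comps (PySem.Set.ofList e.1)) []
  let result0 : PySem.Dict (List String) (List String) :=
    comps.foldl (fun d c => d.insert (PySem.List.sorted c (fun x => x)) []) PySem.Dict.empty
  let owner : PySem.Dict String (List String) :=
    comps.foldl (fun o c =>
      c.foldl (fun o' script => o'.insert script (PySem.List.sorted c (fun x => x))) o)
      PySem.Dict.empty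
  let result := kerningPerScript.foldl (fun d e =>
    match PySem.List.pyGet? e.1 0 with
    | none => d            -- Python: scripts[0] raises IndexError (outside Pre_)
    | some s0 =>
      match owner.get? s0 with
      | none => d          -- Python: owner[s0] raises KeyError (outside Pre_)
      | some key => d.modify key [] (fun v => v ++ e.2)) result0
  result.items

-- ===== PRECONDITION & SPEC =====
-- Pre_ excludes exactly the inputs with an empty script tuple, on which Python A raises AssertionError.
def Pre_mergeScripts (kerningPerScript : List (List String × List String)) : Prop :=
  ∀ e ∈ kerningPerScript, e.1 ≠ []
instance (kerningPerScript : List (List String × List String)) : Decidable (Pre_mergeScripts kerningPerScript) := by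
  unfold Pre_mergeScripts; infer_instance

def pvWitness_mergeScripts : (List (List String × List String)) :=
  [(["DFLT"], ["pair1"]), (["grek", "latn"], ["pair2"]), (["cyrl", "grek"], [])]

def Spec_mergeScripts (kerningPerScript : List (List String × List String)) (out : List (List String × List String)) : Prop := out = mergeScripts_alt kerningPerScript
instance (kerningPerScript : List (List String × List String)) (out : List (List String × List String)) : Decidable (Spec_mergeScripts kerningPerScript out) := by unfold Spec_mergeScripts; infer_instance

-- ===== CLAIM (what is proved, stated in full; the proofs are below) =====
def Claim_equal_mergeScripts : Prop := ∀ (kerningPerScript : List (List String × List String)), Dom_mergeScripts kerningPerScript → Pre_mergeScripts kerningPerScript → Spec_mergeScripts kerningPerScript (mergeScripts kerningPerScript)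

-- ===== LEMMAS AND PROOFS =====

-- set-membership language
abbrev sSub (a b : List String) : Prop := ∀ x ∈ a, x ∈ b
abbrev sEq (a b : List String) : Prop := ∀ x, x ∈ a ↔ x ∈ b
abbrev disjP (a b : List String) : Prop := ∀ x ∈ a, x ∉ b
abbrev lEq (L M : List (List String)) : Prop := List.Forall₂ sEq L M
abbrev BInv (L : List (List String)) : Prop := ∀ s ∈ L, s ≠ [] ∧ s.Nodup

-- one primitive merge: an earlier bucket absorbs a later intersecting one
abbrev Step (L M : List (List String)) : Prop :=
  ∃ (pre : List (List String)) (a : List String) (mid : List (List String))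
    (b : List String) (post : List (List String)),
    L = pre ++ a :: mid ++ b :: post ∧ (∃ x, x ∈ a ∧ x ∈ b) ∧
    M = pre ++ (PySem.Set.union a b) :: mid ++ post

theorem sEq_refl (a : List String) : sEq a a := fun _ => Iff.rfl
theorem lEq_refl (L : List (List String)) : lEq L L := List.forall₂_same.mpr (fun a _ => sEq_refl a)
theorem lEq_trans {L M N : List (List String)} (h1 : lEq L M) (h2 : lEq M N) : lEq L N := by
  induction h1 generalizing N with
  | nil => cases h2; exact List.Forall₂.nil
  | cons h t ih =>
    cases h2 with
    | cons h' t' => exact List.Forall₂.cons (fun x => (h x).trans (h' x)) (ih t')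
theorem lEq_symm {L M : List (List String)} (h : lEq L M) : lEq M L := by
  induction h with
  | nil => exact List.Forall₂.nil
  | cons h t ih => exact List.Forall₂.cons (fun x => (h x).symm) ih
theorem lEq_mem {L M : List (List String)} (h : lEq L M) {t : List String} (ht : t ∈ M) :
    ∃ t' ∈ L, sEq t' t := by
  induction h with
  | nil => cases ht
  | cons hs tl ih =>
    rcases List.mem_cons.mp ht with rfl | ht2
    · exact ⟨_, List.mem_cons_self, hs⟩
    · rcases ih ht2 with ⟨t', ht', he⟩
      exact ⟨t', List.mem_cons_of_mem _ ht', he⟩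

-- B's merge phase: absorbB/closeB/compsB below are a PROOF-ONLY normal form ("saturate the
-- head's component, recurse on the rest"); both loopA and B's incremental fold are related to it.
def absorbB : List String → List (List String) → List String × List (List String) × Bool
  | comp, [] => (comp, [], false)
  | comp, s :: rest =>
    if PySem.Set.isdisjoint comp s then
      let r := absorbB comp rest
      (r.1, s :: r.2.1, r.2.2)
    else
      let r := absorbB (PySem.Set.union comp s) rest
      (r.1, r.2.1, true)

theorem absorbB_kept_le (comp : List String) (rest : List (List String)) :
    (absorbB comp rest).2.1.length ≤ rest.length := by
  induction rest generalizing comp with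
  | nil => simp [absorbB]
  | cons s rest ih =>
    simp only [absorbB]
    split
    · simpa using ih comp
    · exact Nat.le_succ_of_le (ih _)

theorem absorbB_flag_lt (comp : List String) (rest : List (List String))
    (h : (absorbB comp rest).2.2 = true) : (absorbB comp rest).2.1.length < rest.length := by
  induction rest generalizing comp with
  | nil => simp [absorbB] at h
  | cons s rest ih =>
    by_cases hd : PySem.Set.isdisjoint comp s = true
    · simp only [absorbB, if_pos hd, List.length_cons] at h ⊢
      exact Nat.succ_lt_succ (ih comp h)
    · simp only [absorbB, if_neg hd, List.length_cons] at h ⊢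
      exact Nat.lt_succ_of_le (absorbB_kept_le _ _)

def closeB (comp : List String) (rest : List (List String)) : List String × List (List String) :=
  let a := absorbB comp rest
  if h : a.2.2 = true then closeB a.1 a.2.1 else (a.1, a.2.1)
termination_by rest.length
decreasing_by exact absorbB_flag_lt _ _ h

theorem closeB_rem_le (comp : List String) (rest : List (List String)) :
    (closeB comp rest).2.length ≤ rest.length := by
  induction comp, rest using closeB.induct with
  | case1 comp rest a h ih =>
    rw [closeB]
    simp only [a, h] at *
    simp only [dif_pos h]
    exact le_trans ih (absorbB_kept_le _ _)
  | case2 comp rest a h =>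
    rw [closeB]
    simp only [a, h] at *
    simp only [dif_neg h]
    exact absorbB_kept_le _ _

def compsB (pending : List (List String)) : List (List String) :=
  match pending with
  | [] => []
  | comp :: rest =>
    let p := closeB comp rest
    p.1 :: compsB p.2
termination_by pending.length
decreasing_by simp only [List.length_cons]; exact Nat.lt_succ_of_le (closeB_rem_le _ _)

theorem sdisj_comm (a b : List String) : PySem.Set.isdisjoint a b = PySem.Set.isdisjoint b a := by
  rcases h : PySem.Set.isdisjoint b a with _ | _
  · rcases h2 : PySem.Set.isdisjoint a b with _ | _
    · rfl
    · rw [PySem.Set.isdisjoint_iff] at h2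
      have : ¬ (PySem.Set.isdisjoint b a = true) := by simp [h]
      rw [PySem.Set.isdisjoint_iff] at this
      push_neg at this
      rcases this with ⟨x, hxb, hxa⟩
      exact absurd (h2 x hxa) (by simp [hxb])
  · rw [PySem.Set.isdisjoint_iff] at h
    have : PySem.Set.isdisjoint a b = true := by
      rw [PySem.Set.isdisjoint_iff]; intro x hxa hxb; exact h x hxb hxa
    simp [this]

theorem sdisj_false_iff (a b : List String) :
    PySem.Set.isdisjoint a b = false ↔ ∃ x, x ∈ a ∧ x ∈ b := by
  constructor
  · intro h
    have : ¬ (PySem.Set.isdisjoint a b = true) := by simp [h]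
    rw [PySem.Set.isdisjoint_iff] at this
    push_neg at this
    rcases this with ⟨x, hxa, hxb⟩
    exact ⟨x, hxa, by simpa using hxb⟩
  · intro ⟨x, hxa, hxb⟩
    rcases h : PySem.Set.isdisjoint a b with _ | _
    · rfl
    · rw [PySem.Set.isdisjoint_iff] at h; exact absurd (h x hxa) (by simp [hxb])

theorem absorbA_eq (common : List String) (rest : List (List String)) :
    absorbA common rest = absorbB common rest := by
  induction rest generalizing common with
  | nil => rfl
  | cons s rest ih => simp only [absorbA, absorbB, sdisj_comm s common, ih]

-- ---------- absorb-level facts ----------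

theorem ab_flag_false {c : List String} {L : List (List String)}
    (h : (absorbB c L).2.2 = false) : absorbB c L = (c, L, false) := by
  induction L generalizing c with
  | nil => rfl
  | cons s L ih =>
    by_cases hd : PySem.Set.isdisjoint c s = true
    · simp only [absorbB, if_pos hd] at h ⊢
      rw [ih h]
    · simp only [absorbB, if_neg hd] at h
      cases h

theorem ab_disj_of_flag_false {c : List String} {L : List (List String)}
    (h : (absorbB c L).2.2 = false) : ∀ s ∈ L, PySem.Set.isdisjoint c s = true := by
  induction L generalizing c with
  | nil => intro s hs; cases hs
  | cons s L ih =>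
    by_cases hd : PySem.Set.isdisjoint c s = true
    · simp only [absorbB, if_pos hd] at h
      intro t ht
      rcases List.mem_cons.mp ht with rfl | ht
      · exact hd
      · exact ih h t ht
    · simp only [absorbB, if_neg hd] at h
      cases h

theorem ab_sub (c : List String) (L : List (List String)) : sSub c (absorbB c L).1 := by
  induction L generalizing c with
  | nil => intro x hx; simpa [absorbB] using hx
  | cons s L ih =>
    by_cases hd : PySem.Set.isdisjoint c s = true
    · simp only [absorbB, if_pos hd]; exact ih c
    · simp only [absorbB, if_neg hd]
      intro x hx
      exact ih _ x ((PySem.Set.mem_union c s x).mpr (Or.inl hx))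

theorem ab_absorbed (c : List String) (L : List (List String)) :
    ∀ s ∈ L, s ∈ (absorbB c L).2.1 ∨ sSub s (absorbB c L).1 := by
  induction L generalizing c with
  | nil => intro s hs; cases hs
  | cons s L ih =>
    intro t ht
    by_cases hd : PySem.Set.isdisjoint c s = true
    · simp only [absorbB, if_pos hd]
      rcases List.mem_cons.mp ht with rfl | ht
      · exact Or.inl (List.mem_cons_self)
      · rcases ih c t ht with h | h
        · exact Or.inl (List.mem_cons_of_mem _ h)
        · exact Or.inr h
    · simp only [absorbB, if_neg hd]
      rcases List.mem_cons.mp ht with rfl | ht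
      · exact Or.inr (fun x hx =>
          ab_sub _ L x ((PySem.Set.mem_union c t x).mpr (Or.inr hx)))
      · exact ih _ t ht

theorem ab_kept_mem (c : List String) (L : List (List String)) :
    ∀ s ∈ (absorbB c L).2.1, s ∈ L := by
  induction L generalizing c with
  | nil => intro s hs; simp [absorbB] at hs
  | cons s L ih =>
    by_cases hd : PySem.Set.isdisjoint c s = true
    · simp only [absorbB, if_pos hd]
      intro t ht
      rcases List.mem_cons.mp ht with rfl | ht
      · exact List.mem_cons_self
      · exact List.mem_cons_of_mem _ (ih c t ht)
    · simp only [absorbB, if_neg hd]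
      intro t ht
      exact List.mem_cons_of_mem _ (ih _ t ht)

theorem ab_min (c : List String) (L : List (List String)) (X : String → Prop)
    (hc : ∀ x ∈ c, X x) (hsat : ∀ s ∈ L, (∃ x ∈ s, X x) → ∀ x ∈ s, X x) :
    ∀ x ∈ (absorbB c L).1, X x := by
  induction L generalizing c with
  | nil => simpa [absorbB] using hc
  | cons s L ih =>
    by_cases hd : PySem.Set.isdisjoint c s = true
    · simp only [absorbB, if_pos hd]
      exact ih c hc (fun t ht => hsat t (List.mem_cons_of_mem _ ht))
    · simp only [absorbB, if_neg hd]
      apply ih _ ?_ (fun t ht => hsat t (List.mem_cons_of_mem _ ht))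
      intro x hx
      rcases (PySem.Set.mem_union c s x).mp hx with hxc | hxs
      · exact hc x hxc
      · rcases (show ∃ y ∈ c, y ∈ s by simpa using hd) with ⟨y, hyc, hys⟩
        exact hsat s List.mem_cons_self ⟨y, hys, hc y hyc⟩ x hxs

theorem ab_filter (c : List String) (L : List (List String)) (Y : List String)
    (hY : sSub (absorbB c L).1 Y) (hne : ∀ s ∈ L, s ≠ []) :
    (absorbB c L).2.1.filter (fun s => PySem.Set.isdisjoint s Y)
      = L.filter (fun s => PySem.Set.isdisjoint s Y) := by
  induction L generalizing c with
  | nil => rfl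
  | cons s L ih =>
    by_cases hd : PySem.Set.isdisjoint c s = true
    · simp only [absorbB, if_pos hd] at hY ⊢
      rw [List.filter_cons, List.filter_cons]
      rw [ih c hY (fun t ht => hne t (List.mem_cons_of_mem _ ht))]
    · simp only [absorbB, if_neg hd] at hY ⊢
      have hsY : PySem.Set.isdisjoint s Y = false := by
        rw [sdisj_false_iff]
        rcases List.exists_mem_of_ne_nil s (hne s List.mem_cons_self) with ⟨x, hx⟩
        exact ⟨x, hx, hY x (ab_sub _ L x ((PySem.Set.mem_union c s x).mpr (Or.inr hx)))⟩
      rw [List.filter_cons, hsY]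
      simp only [Bool.false_eq_true, if_false]
      exact ih _ hY (fun t ht => hne t (List.mem_cons_of_mem _ ht))

-- ---------- closeB-level facts ----------

theorem cb_sub (c : List String) (L : List (List String)) : sSub c (closeB c L).1 := by
  induction c, L using closeB.induct with
  | case1 c L a h ih =>
    rw [closeB]
    simp only [a, h] at *
    simp only [dif_pos h]
    exact fun x hx => ih x (ab_sub c L x hx)
  | case2 c L a h =>
    rw [closeB]
    simp only [a, h] at *
    simp only [dif_neg h]
    exact ab_sub c L

theorem cb_sat (c : List String) (L : List (List String)) :
    ∀ s ∈ L, (∃ x ∈ s, x ∈ (closeB c L).1) → sSub s (closeB c L).1 := by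
  induction c, L using closeB.induct with
  | case1 c L a h ih =>
    rw [closeB]
    simp only [a, h] at *
    simp only [dif_pos h]
    intro s hs hx
    rcases ab_absorbed c L s hs with hk | hsub
    · exact ih s hk hx
    · exact fun y hy => cb_sub _ _ y (hsub y hy)
  | case2 c L a h =>
    rw [closeB]
    have hff : (absorbB c L).2.2 = false := Bool.eq_false_iff.mpr h
    simp only [a] at *
    simp only [dif_neg h]
    intro s hs hx
    have hdisj := ab_disj_of_flag_false hff s hs
    have heq := ab_flag_false (c := c) (L := L) hff
    rw [heq] at hx ⊢
    rcases hx with ⟨x, hxs, hxc⟩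
    rw [PySem.Set.isdisjoint_iff] at hdisj
    exact absurd hxs (hdisj x hxc)

theorem cb_min (c : List String) (L : List (List String)) (X : String → Prop)
    (hc : ∀ x ∈ c, X x) (hsat : ∀ s ∈ L, (∃ x ∈ s, X x) → ∀ x ∈ s, X x) :
    ∀ x ∈ (closeB c L).1, X x := by
  induction c, L using closeB.induct with
  | case1 c L a h ih =>
    rw [closeB]
    simp only [a, h] at *
    simp only [dif_pos h]
    exact fun x hx => ih (ab_min c L X hc hsat)
      (fun t ht => hsat t (ab_kept_mem c L t ht)) x hx
  | case2 c L a h =>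
    rw [closeB]
    simp only [a, h] at *
    simp only [dif_neg h]
    exact ab_min c L X hc hsat

theorem cb_rem_mem (c : List String) (L : List (List String)) :
    ∀ s ∈ (closeB c L).2, s ∈ L := by
  induction c, L using closeB.induct with
  | case1 c L a h ih =>
    rw [closeB]
    simp only [a, h] at *
    simp only [dif_pos h]
    exact fun s hs => ab_kept_mem c L s (ih s hs)
  | case2 c L a h =>
    rw [closeB]
    simp only [a, h] at *
    simp only [dif_neg h]
    exact ab_kept_mem c L

theorem cb_rem (c : List String) (L : List (List String)) (hne : ∀ s ∈ L, s ≠ []) :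
    (closeB c L).2 = L.filter (fun s => PySem.Set.isdisjoint s (closeB c L).1) := by
  induction c, L using closeB.induct with
  | case1 c L a h ih =>
    rw [closeB]
    simp only [a, h] at *
    simp only [dif_pos h]
    rw [ih (fun t ht => hne t (ab_kept_mem c L t ht))]
    exact ab_filter c L _ (fun x hx => cb_sub _ _ x hx) hne
  | case2 c L a h =>
    rw [closeB]
    have hff : (absorbB c L).2.2 = false := Bool.eq_false_iff.mpr h
    simp only [a] at *
    simp only [dif_neg h]
    have heq := ab_flag_false (c := c) (L := L) hff
    rw [heq]
    have hall := ab_disj_of_flag_false (c := c) (L := L) hff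
    symm
    rw [List.filter_eq_self]
    intro s hs
    rw [← sdisj_comm]
    exact hall s hs

-- ---------- primitive merge steps ----------

theorem sdisj_congr {Y Y' : List String} (h : sEq Y Y') (s : List String) :
    PySem.Set.isdisjoint s Y = PySem.Set.isdisjoint s Y' := by
  rw [Bool.eq_iff_iff, PySem.Set.isdisjoint_iff, PySem.Set.isdisjoint_iff]
  constructor
  · intro hp x hx hx'; exact hp x hx ((h x).mpr hx')
  · intro hp x hx hx'; exact hp x hx ((h x).mp hx')

theorem sdisj_union_eq (a b Y : List String) :
    PySem.Set.isdisjoint (PySem.Set.union a b) Y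
      = (PySem.Set.isdisjoint a Y && PySem.Set.isdisjoint b Y) := by
  rw [Bool.eq_iff_iff, Bool.and_eq_true, PySem.Set.isdisjoint_iff, PySem.Set.isdisjoint_iff,
    PySem.Set.isdisjoint_iff]
  constructor
  · intro hp
    exact ⟨fun x hx => hp x ((PySem.Set.mem_union a b x).mpr (Or.inl hx)),
           fun x hx => hp x ((PySem.Set.mem_union a b x).mpr (Or.inr hx))⟩
  · intro ⟨h1, h2⟩ x hx
    rcases (PySem.Set.mem_union a b x).mp hx with h | h
    · exact h1 x h
    · exact h2 x h

theorem step_binv {L M : List (List String)} (hst : Step L M) (hinv : BInv L) : BInv M := by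
  rcases hst with ⟨pre, a, mid, b, post, rfl, ⟨x0, hx0a, hx0b⟩, rfl⟩
  have ha : a ∈ pre ++ a :: mid ++ b :: post := by simp
  intro s hs
  have hs' : s = PySem.Set.union a b ∨ s ∈ pre ++ a :: mid ++ b :: post := by
    simp only [List.mem_append, List.mem_cons] at hs ⊢
    tauto
  rcases hs' with rfl | h
  · constructor
    · exact List.ne_nil_of_mem ((PySem.Set.mem_union a b x0).mpr (Or.inl hx0a))
    · exact PySem.Set.nodup_union a b (hinv a ha).2
  · exact hinv s h

theorem step_cons (x : List String) {K K' : List (List String)} (h : Step K K') :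
    Step (x :: K) (x :: K') := by
  rcases h with ⟨pre, a, mid, b, post, rfl, hx, rfl⟩
  exact ⟨x :: pre, a, mid, b, post, by simp, hx, by simp⟩

theorem rtg_cons (x : List String) {K K' : List (List String)}
    (h : Relation.ReflTransGen Step K K') :
    Relation.ReflTransGen Step (x :: K) (x :: K') :=
  Relation.ReflTransGen.lift (x :: ·) (fun _ _ hs => step_cons x hs) h

theorem rtg_binv {L M : List (List String)} (h : Relation.ReflTransGen Step L M)
    (hinv : BInv L) : BInv M := by
  induction h with
  | refl => exact hinv
  | tail _ hstep ih => exact step_binv hstep ih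

-- a bucket already saturated absorbs an intersecting member up front: same component
theorem comp_cu_sEq (a b : List String) (mid post : List (List String))
    (hx : ∃ x, x ∈ a ∧ x ∈ b) :
    sEq (closeB (PySem.Set.union a b) (mid ++ post)).1 (closeB a (mid ++ b :: post)).1 := by
  rcases hx with ⟨x0, hx0a, hx0b⟩
  have hbmem : b ∈ mid ++ b :: post := by simp
  have hbsub : sSub b (closeB a (mid ++ b :: post)).1 :=
    cb_sat a (mid ++ b :: post) b hbmem ⟨x0, hx0b, cb_sub a _ x0 hx0a⟩
  intro y
  constructor
  · intro hy
    refine cb_min (PySem.Set.union a b) (mid ++ post) (· ∈ (closeB a (mid ++ b :: post)).1)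
      ?_ ?_ y hy
    · intro z hz
      rcases (PySem.Set.mem_union a b z).mp hz with h | h
      · exact cb_sub a _ z h
      · exact hbsub z h
    · intro s hs hex
      have hs' : s ∈ mid ++ b :: post := by
        simp only [List.mem_append, List.mem_cons] at hs ⊢; tauto
      exact cb_sat a _ s hs' hex
  · intro hy
    refine cb_min a (mid ++ b :: post) (· ∈ (closeB (PySem.Set.union a b) (mid ++ post)).1)
      ?_ ?_ y hy
    · intro z hz
      exact cb_sub _ _ z ((PySem.Set.mem_union a b z).mpr (Or.inl hz))
    · intro s hs hex
      have husub : sSub (PySem.Set.union a b) (closeB (PySem.Set.union a b) (mid ++ post)).1 :=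
        cb_sub _ _
      simp only [List.mem_append, List.mem_cons] at hs
      rcases hs with h | h | h
      · exact cb_sat _ (mid ++ post) s (by simp [h]) hex
      · exact fun z hz => husub z ((PySem.Set.mem_union a b z).mpr (Or.inr (h ▸ hz)))
      · exact cb_sat _ (mid ++ post) s (by simp [h]) hex

-- merging two intersecting later members does not change the head's component
theorem comp_step_sEq (p : List String) {T T' : List (List String)} (hst : Step T T') :
    sEq (closeB p T').1 (closeB p T).1 := by
  rcases hst with ⟨pre, a, mid, b, post, rfl, ⟨x0, hx0a, hx0b⟩, rfl⟩
  have haT : a ∈ pre ++ a :: mid ++ b :: post := by simp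
  have hbT : b ∈ pre ++ a :: mid ++ b :: post := by simp
  have huT' : PySem.Set.union a b ∈ pre ++ PySem.Set.union a b :: mid ++ post := by simp
  intro y
  constructor
  · intro hy
    refine cb_min p _ (· ∈ (closeB p (pre ++ a :: mid ++ b :: post)).1) (cb_sub p _) ?_ y hy
    · intro s hs hex
      have hs' : s = PySem.Set.union a b ∨ s ∈ pre ++ a :: mid ++ b :: post := by
        simp only [List.mem_append, List.mem_cons] at hs ⊢
        tauto
      rcases hs' with rfl | h
      · rcases hex with ⟨z, hz, hzc⟩
        rcases (PySem.Set.mem_union a b z).mp hz with h | h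
        · have hasub := cb_sat p _ a haT ⟨z, h, hzc⟩
          have hbsub := cb_sat p _ b hbT ⟨x0, hx0b, hasub x0 hx0a⟩
          intro w hw
          rcases (PySem.Set.mem_union a b w).mp hw with h' | h'
          · exact hasub w h'
          · exact hbsub w h'
        · have hbsub := cb_sat p _ b hbT ⟨z, h, hzc⟩
          have hasub := cb_sat p _ a haT ⟨x0, hx0a, hbsub x0 hx0b⟩
          intro w hw
          rcases (PySem.Set.mem_union a b w).mp hw with h' | h'
          · exact hasub w h'
          · exact hbsub w h'
      · exact cb_sat p _ s h hex
  · intro hy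
    refine cb_min p _ (· ∈ (closeB p (pre ++ PySem.Set.union a b :: mid ++ post)).1)
      (cb_sub p _) ?_ y hy
    · intro s hs hex
      simp only [List.mem_append, List.mem_cons] at hs
      have husub : (∃ z ∈ PySem.Set.union a b, z ∈ (closeB p (pre ++ PySem.Set.union a b :: mid ++ post)).1) →
          sSub (PySem.Set.union a b) (closeB p (pre ++ PySem.Set.union a b :: mid ++ post)).1 :=
        cb_sat p _ _ huT'
      have hs2 : s = a ∨ s = b ∨ s ∈ pre ++ PySem.Set.union a b :: mid ++ post := by
        simp only [List.mem_append, List.mem_cons] at hs ⊢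
        tauto
      rcases hs2 with h2 | h2 | h2
      · rcases hex with ⟨z, hz, hzc⟩
        intro w hw
        exact husub ⟨z, (PySem.Set.mem_union a b z).mpr (Or.inl (h2 ▸ hz)), hzc⟩ w
          ((PySem.Set.mem_union a b w).mpr (Or.inl (h2 ▸ hw)))
      · rcases hex with ⟨z, hz, hzc⟩
        intro w hw
        exact husub ⟨z, (PySem.Set.mem_union a b z).mpr (Or.inr (h2 ▸ hz)), hzc⟩ w
          ((PySem.Set.mem_union a b w).mpr (Or.inr (h2 ▸ hw)))
      · exact cb_sat p _ s h2 hex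

theorem compsB_cons (c : List String) (rest : List (List String)) :
    compsB (c :: rest) = (closeB c rest).1 :: compsB (closeB c rest).2 := by
  rw [compsB]

-- one merge step anywhere in the list leaves the component list unchanged up to set equality
theorem step_comps : ∀ (n : Nat) (L M : List (List String)), L.length ≤ n → Step L M →
    BInv L → lEq (compsB M) (compsB L) := by
  intro n
  induction n with
  | zero =>
    intro L M hlen hst _
    rcases hst with ⟨pre, a, mid, b, post, rfl, _, _⟩
    simp at hlen
  | succ n ih =>
    intro L M hlen hst hinv
    rcases hst with ⟨pre, a, mid, b, post, rfl, hx, rfl⟩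
    rcases hx with ⟨x0, hx0a, hx0b⟩
    cases pre with
    | nil =>
      simp only [List.nil_append, List.cons_append] at hlen hinv ⊢
      rw [compsB_cons, compsB_cons]
      have hcu := comp_cu_sEq a b mid post ⟨x0, hx0a, hx0b⟩
      have hne1 : ∀ s ∈ mid ++ b :: post, s ≠ [] := fun s hs =>
        (hinv s (List.mem_cons_of_mem _ hs)).1
      have hne2 : ∀ s ∈ mid ++ post, s ≠ [] := by
        intro s hs
        apply hne1
        simp only [List.mem_append, List.mem_cons] at hs ⊢
        tauto
      have h1 := cb_rem a (mid ++ b :: post) hne1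
      have h2 := cb_rem (PySem.Set.union a b) (mid ++ post) hne2
      have h2' : (closeB (PySem.Set.union a b) (mid ++ post)).2
          = (mid ++ post).filter
              (fun s => PySem.Set.isdisjoint s (closeB a (mid ++ b :: post)).1) := by
        rw [h2]
        exact List.filter_congr (fun s _ => sdisj_congr hcu s)
      have hPb : PySem.Set.isdisjoint b (closeB a (mid ++ b :: post)).1 = false :=
        (sdisj_false_iff _ _).mpr ⟨x0, hx0b, cb_sub a _ x0 hx0a⟩
      have hrem : (closeB (PySem.Set.union a b) (mid ++ post)).2
          = (closeB a (mid ++ b :: post)).2 := by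
        rw [h2', h1]
        simp only [List.filter_append, List.filter_cons]
        rw [hPb]
        simp
      rw [hrem]
      exact List.Forall₂.cons hcu (lEq_refl _)
    | cons q pre' =>
      simp only [List.cons_append] at hlen hinv ⊢
      rw [compsB_cons, compsB_cons]
      have hstT : Step (pre' ++ a :: mid ++ b :: post) (pre' ++ PySem.Set.union a b :: mid ++ post) :=
        ⟨pre', a, mid, b, post, rfl, ⟨x0, hx0a, hx0b⟩, rfl⟩
      have hse := comp_step_sEq q hstT
      have haT : a ∈ pre' ++ a :: mid ++ b :: post := by simp
      have hbT : b ∈ pre' ++ a :: mid ++ b :: post := by simp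
      have hneT : ∀ s ∈ pre' ++ a :: mid ++ b :: post, s ≠ [] := fun s hs =>
        (hinv s (List.mem_cons_of_mem _ hs)).1
      have hneT' : ∀ s ∈ pre' ++ PySem.Set.union a b :: mid ++ post, s ≠ [] := by
        intro s hs
        have hs2 : s = PySem.Set.union a b ∨ s ∈ pre' ++ a :: mid ++ b :: post := by
          simp only [List.mem_append, List.mem_cons] at hs ⊢
          tauto
        rcases hs2 with h2 | h2
        · rw [h2]
          exact List.ne_nil_of_mem ((PySem.Set.mem_union a b x0).mpr (Or.inl hx0a))
        · exact hneT s h2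
      have h1 := cb_rem q (pre' ++ a :: mid ++ b :: post) hneT
      have h2 := cb_rem q (pre' ++ PySem.Set.union a b :: mid ++ post) hneT'
      have h2' : (closeB q (pre' ++ PySem.Set.union a b :: mid ++ post)).2
          = (pre' ++ PySem.Set.union a b :: mid ++ post).filter
              (fun s => PySem.Set.isdisjoint s (closeB q (pre' ++ a :: mid ++ b :: post)).1) := by
        rw [h2]
        exact List.filter_congr (fun s _ => sdisj_congr hse s)
      have hlenT : (pre' ++ a :: mid ++ b :: post).length ≤ n := by
        simp only [List.length_cons] at hlen
        omega
      by_cases hda : PySem.Set.isdisjoint a (closeB q (pre' ++ a :: mid ++ b :: post)).1 = true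
      · have hdb : PySem.Set.isdisjoint b (closeB q (pre' ++ a :: mid ++ b :: post)).1 = true := by
          by_contra hdb
          have hdb' := Bool.eq_false_iff.mpr hdb
          rcases (sdisj_false_iff _ _).mp hdb' with ⟨y, hyb, hyc⟩
          have hbsub := cb_sat q _ b hbT ⟨y, hyb, hyc⟩
          have hfa : PySem.Set.isdisjoint a (closeB q (pre' ++ a :: mid ++ b :: post)).1 = false :=
            (sdisj_false_iff _ _).mpr ⟨x0, hx0a, hbsub x0 hx0b⟩
          rw [hfa] at hda
          cases hda
        have hrem1 : (closeB q (pre' ++ a :: mid ++ b :: post)).2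
            = (pre'.filter (fun s => PySem.Set.isdisjoint s (closeB q (pre' ++ a :: mid ++ b :: post)).1))
              ++ a :: (mid.filter (fun s => PySem.Set.isdisjoint s (closeB q (pre' ++ a :: mid ++ b :: post)).1))
              ++ b :: (post.filter (fun s => PySem.Set.isdisjoint s (closeB q (pre' ++ a :: mid ++ b :: post)).1)) := by
          rw [h1]
          simp only [List.filter_append, List.filter_cons]
          rw [hda, hdb]
          simp
        have hrem2 : (closeB q (pre' ++ PySem.Set.union a b :: mid ++ post)).2
            = (pre'.filter (fun s => PySem.Set.isdisjoint s (closeB q (pre' ++ a :: mid ++ b :: post)).1))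
              ++ PySem.Set.union a b :: (mid.filter (fun s => PySem.Set.isdisjoint s (closeB q (pre' ++ a :: mid ++ b :: post)).1))
              ++ (post.filter (fun s => PySem.Set.isdisjoint s (closeB q (pre' ++ a :: mid ++ b :: post)).1)) := by
          rw [h2']
          simp only [List.filter_append, List.filter_cons, sdisj_union_eq]
          rw [hda, hdb]
          simp
        have hstep_rem : Step (closeB q (pre' ++ a :: mid ++ b :: post)).2
            (closeB q (pre' ++ PySem.Set.union a b :: mid ++ post)).2 := by
          rw [hrem1, hrem2]
          exact ⟨pre'.filter (fun s => PySem.Set.isdisjoint s (closeB q (pre' ++ a :: mid ++ b :: post)).1), a,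
                 mid.filter (fun s => PySem.Set.isdisjoint s (closeB q (pre' ++ a :: mid ++ b :: post)).1), b,
                 post.filter (fun s => PySem.Set.isdisjoint s (closeB q (pre' ++ a :: mid ++ b :: post)).1),
                 by simp, ⟨x0, hx0a, hx0b⟩, by simp⟩
        have hinv_rem : BInv (closeB q (pre' ++ a :: mid ++ b :: post)).2 := by
          intro s hs
          exact hinv s (List.mem_cons_of_mem _ (cb_rem_mem q _ s hs))
        have hlen_rem : (closeB q (pre' ++ a :: mid ++ b :: post)).2.length ≤ n :=
          le_trans (closeB_rem_le _ _) hlenT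
        exact List.Forall₂.cons hse (ih _ _ hlen_rem hstep_rem hinv_rem)
      · have hda' := Bool.eq_false_iff.mpr hda
        rcases (sdisj_false_iff _ _).mp hda' with ⟨y, hya, hyc⟩
        have hasub := cb_sat q _ a haT ⟨y, hya, hyc⟩
        have hdb : PySem.Set.isdisjoint b (closeB q (pre' ++ a :: mid ++ b :: post)).1 = false :=
          (sdisj_false_iff _ _).mpr ⟨x0, hx0b, hasub x0 hx0a⟩
        have hrem : (closeB q (pre' ++ PySem.Set.union a b :: mid ++ post)).2
            = (closeB q (pre' ++ a :: mid ++ b :: post)).2 := by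
          rw [h2', h1]
          simp only [List.filter_append, List.filter_cons, sdisj_union_eq]
          rw [hda', hdb]
          simp
        rw [hrem]
        exact List.Forall₂.cons hse (lEq_refl _)

theorem rtg_comps {L M : List (List String)} (h : Relation.ReflTransGen Step L M)
    (hinv : BInv L) : lEq (compsB M) (compsB L) := by
  induction h with
  | refl => exact lEq_refl _
  | tail h1 hstep ih =>
    exact lEq_trans (step_comps _ _ _ le_rfl hstep (rtg_binv h1 hinv)) ih

-- ---------- the merge pass of A is a sequence of primitive steps ----------

theorem s1_abs : ∀ (rest : List (List String)) (c : List String) (kept0 : List (List String)),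
    Relation.ReflTransGen Step (c :: kept0 ++ rest)
      ((absorbB c rest).1 :: kept0 ++ (absorbB c rest).2.1) := by
  intro rest
  induction rest with
  | nil =>
    intro c kept0
    simp only [absorbB, List.append_nil]
    exact Relation.ReflTransGen.refl
  | cons s rest ih =>
    intro c kept0
    by_cases hd : PySem.Set.isdisjoint c s = true
    · simp only [absorbB, if_pos hd]
      have h := ih c (kept0 ++ [s])
      simp only [List.cons_append, List.append_assoc] at h ⊢
      exact h
    · simp only [absorbB, if_neg hd]
      have hstep : Step (c :: kept0 ++ s :: rest) (PySem.Set.union c s :: kept0 ++ rest) :=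
        ⟨[], c, kept0, s, rest, by simp, (sdisj_false_iff c s).mp (Bool.eq_false_iff.mpr hd), by simp⟩
      exact Relation.ReflTransGen.head hstep (ih _ kept0)

theorem s1_inner : ∀ (L : List (List String)), Relation.ReflTransGen Step L (innerA L).1 := by
  intro L
  induction L using innerA.induct with
  | case1 =>
    rw [innerA]
  | case2 common rest a ih =>
    rw [innerA]
    have h1 := s1_abs rest common []
    rw [← absorbA_eq] at h1
    simp only [List.cons_append, List.nil_append] at h1
    exact h1.trans (rtg_cons _ ih)

theorem inner_flagfalse_id : ∀ (L : List (List String)), (innerA L).2 = false → (innerA L).1 = L := by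
  intro L
  induction L using innerA.induct with
  | case1 => intro _; rw [innerA]
  | case2 common rest a ih =>
    intro h
    rw [innerA] at h ⊢
    obtain ⟨h1, h2⟩ : _ ∧ _ := by simpa using h
    rw [absorbA_eq] at h1
    have hh := ab_flag_false h1
    have e1 : (absorbA common rest).1 = common := by rw [absorbA_eq, hh]
    have e2 : (absorbA common rest).2.1 = rest := by rw [absorbA_eq, hh]
    have h3 := ih h2
    rw [e2] at h3
    rw [e1, e2, h3]

theorem inner_flagfalse_comps : ∀ (L : List (List String)), (innerA L).2 = false → compsB L = L := by
  intro L
  induction L using innerA.induct with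
  | case1 => intro _; rw [compsB]
  | case2 common rest a ih =>
    intro h
    rw [innerA] at h
    obtain ⟨h1, h2⟩ : _ ∧ _ := by simpa using h
    rw [absorbA_eq] at h1
    have hh := ab_flag_false h1
    rw [compsB_cons]
    have hc : closeB common rest = (common, rest) := by
      rw [closeB]
      simp only [hh]
      rfl
    rw [hc]
    have h3 := ih h2
    have e2 : (absorbA common rest).2.1 = rest := by rw [absorbA_eq, hh]
    rw [e2] at h3
    rw [h3]

theorem loopA_rtg : ∀ (L : List (List String)), Relation.ReflTransGen Step L (loopA L) := by
  intro L
  induction L using loopA.induct with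
  | case1 sets p h ih =>
    rw [loopA]
    simp only [p, h] at *
    simp only [dif_pos h]
    exact (s1_inner sets).trans ih
  | case2 sets p h =>
    rw [loopA]
    simp only [p, h] at *
    simp only [dif_neg h]
    exact s1_inner sets

theorem loopA_comps : ∀ (L : List (List String)), BInv L → lEq (loopA L) (compsB L) := by
  intro L
  induction L using loopA.induct with
  | case1 sets p h ih =>
    intro hinv
    rw [loopA]
    simp only [p, h] at *
    simp only [dif_pos h]
    have hinv' : BInv (innerA sets).1 := rtg_binv (s1_inner sets) hinv
    exact lEq_trans (ih hinv') (rtg_comps (s1_inner sets) hinv)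
  | case2 sets p h =>
    intro hinv
    have hf : (innerA sets).2 = false := Bool.eq_false_iff.mpr h
    rw [loopA]
    simp only [p] at *
    simp only [dif_neg h]
    rw [inner_flagfalse_id sets hf, inner_flagfalse_comps sets hf]
    exact lEq_refl sets

-- ---------- B's incremental fold is a sequence of primitive steps ----------

theorem rtg_mergeRun : ∀ (ds : List (List String)) (acc : List String)
    (pre mid post : List (List String)),
    Relation.ReflTransGen Step (pre ++ acc :: mid ++ ds ++ post)
      (pre ++ (mergeRun acc ds).1 :: mid ++ (mergeRun acc ds).2 ++ post) := by
  intro ds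
  induction ds with
  | nil => intro acc pre mid post; simp only [mergeRun, List.nil_append]; exact .refl
  | cons d ds ih =>
    intro acc pre mid post
    by_cases hd : PySem.Set.isdisjoint d acc = true
    · simp only [mergeRun, if_pos hd]
      have h := ih acc pre (mid ++ [d]) post
      simp only [List.cons_append, List.append_assoc, List.nil_append] at h ⊢
      exact h
    · simp only [mergeRun, if_neg hd]
      have hx : ∃ x, x ∈ acc ∧ x ∈ d := by
        rcases (sdisj_false_iff d acc).mp (Bool.eq_false_iff.mpr hd) with ⟨x, hxd, hxa⟩
        exact ⟨x, hxa, hxd⟩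
      have hstep : Step (pre ++ acc :: mid ++ (d :: ds) ++ post)
          (pre ++ (PySem.Set.union acc d) :: mid ++ ds ++ post) :=
        ⟨pre, acc, mid, d, ds ++ post, by simp, hx, by simp⟩
      exact Relation.ReflTransGen.head hstep (ih _ pre mid post)

theorem rtg_addB : ∀ (comps : List (List String)) (new : List String)
    (rest : List (List String)),
    Relation.ReflTransGen Step (comps ++ new :: rest) (addB comps new ++ rest) := by
  intro comps
  induction comps with
  | nil => intro new rest; simp only [addB, List.nil_append, List.cons_append]; exact .refl
  | cons c cs ih =>
    intro new rest
    by_cases hd : PySem.Set.isdisjoint c new = true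
    · simp only [addB, if_pos hd, List.cons_append]
      exact rtg_cons c (ih new rest)
    · simp only [addB, if_neg hd]
      have hx : ∃ x, x ∈ c ∧ x ∈ new :=
        (sdisj_false_iff c new).mp (Bool.eq_false_iff.mpr hd)
      have hstep : Step ((c :: cs) ++ new :: rest) (PySem.Set.union c new :: cs ++ rest) :=
        ⟨[], c, cs, new, rest, by simp, hx, by simp⟩
      refine Relation.ReflTransGen.head hstep ?_
      have h := rtg_mergeRun cs (PySem.Set.union c new) [] [] rest
      simp only [List.nil_append, List.cons_append] at h ⊢
      exact h

theorem rtg_foldl_addB : ∀ (L : List (List String)) (acc : List (List String)),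
    Relation.ReflTransGen Step (acc ++ L) (L.foldl addB acc) := by
  intro L
  induction L with
  | nil => intro acc; simp only [List.foldl_nil, List.append_nil]; exact .refl
  | cons s L ih =>
    intro acc
    simp only [List.foldl_cons]
    exact (rtg_addB acc s L).trans (ih (addB acc s))

-- B's guarded fold over the entries equals the plain fold over the nonempty script sets
theorem foldB_filterMap (kps : List (List String × List String)) :
    ∀ (acc : List (List String)),
    kps.foldl (fun comps e => if e.1.isEmpty then comps else addB comps (PySem.Set.ofList e.1)) acc
      = (kps.filterMap (fun e => if e.1.isEmpty then none else some (PySem.Set.ofList e.1))).foldl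
          addB acc := by
  induction kps with
  | nil => intro acc; rfl
  | cons e kps ih =>
    intro acc
    by_cases he : e.1.isEmpty
    · simp only [List.foldl_cons, List.filterMap_cons, if_pos he, ih]
    · simp only [List.foldl_cons, List.filterMap_cons, if_neg he, List.foldl_cons, ih]

-- ---------- B's result is pairwise disjoint ----------

theorem mr_kept_mem (ds : List (List String)) : ∀ (acc : List String),
    ∀ k ∈ (mergeRun acc ds).2, k ∈ ds := by
  induction ds with
  | nil => intro acc k hk; simp [mergeRun] at hk
  | cons d ds ih =>
    intro acc k hk
    by_cases hd : PySem.Set.isdisjoint d acc = true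
    · simp only [mergeRun, if_pos hd] at hk
      rcases List.mem_cons.mp hk with rfl | hk2
      · exact List.mem_cons_self
      · exact List.mem_cons_of_mem _ (ih acc k hk2)
    · simp only [mergeRun, if_neg hd] at hk
      exact List.mem_cons_of_mem _ (ih _ k hk)

theorem mr_kept_sublist (ds : List (List String)) : ∀ (acc : List String),
    (mergeRun acc ds).2.Sublist ds := by
  induction ds with
  | nil => intro acc; simp [mergeRun]
  | cons d ds ih =>
    intro acc
    by_cases hd : PySem.Set.isdisjoint d acc = true
    · simp only [mergeRun, if_pos hd]
      exact List.Sublist.cons₂ d (ih acc)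
    · simp only [mergeRun, if_neg hd]
      exact List.Sublist.cons d (ih _)

theorem mr_from (ds : List (List String)) : ∀ (acc : List String),
    ∀ x ∈ (mergeRun acc ds).1, x ∈ acc ∨ ∃ d ∈ ds, x ∈ d := by
  induction ds with
  | nil => intro acc x hx; simp only [mergeRun] at hx; exact Or.inl hx
  | cons d ds ih =>
    intro acc x hx
    by_cases hd : PySem.Set.isdisjoint d acc = true
    · simp only [mergeRun, if_pos hd] at hx
      rcases ih acc x hx with h | ⟨t, ht, hxt⟩
      · exact Or.inl h
      · exact Or.inr ⟨t, List.mem_cons_of_mem _ ht, hxt⟩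
    · simp only [mergeRun, if_neg hd] at hx
      rcases ih _ x hx with h | ⟨t, ht, hxt⟩
      · rcases (PySem.Set.mem_union acc d x).mp h with h | h
        · exact Or.inl h
        · exact Or.inr ⟨d, List.mem_cons_self, h⟩
      · exact Or.inr ⟨t, List.mem_cons_of_mem _ ht, hxt⟩

theorem mr_disj_kept (ds : List (List String)) : ∀ (acc : List String),
    ds.Pairwise disjP →
    ∀ k ∈ (mergeRun acc ds).2, disjP (mergeRun acc ds).1 k := by
  induction ds with
  | nil => intro acc _ k hk; simp [mergeRun] at hk
  | cons d ds ih =>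
    intro acc hpw k hk
    rcases List.pairwise_cons.mp hpw with ⟨hhd, htl⟩
    by_cases hd : PySem.Set.isdisjoint d acc = true
    · simp only [mergeRun, if_pos hd] at hk ⊢
      have hdacc : ∀ x ∈ d, x ∉ acc := by
        intro x hx
        rw [PySem.Set.isdisjoint_iff] at hd
        exact hd x hx
      rcases List.mem_cons.mp hk with rfl | hk2
      · intro x hx hxk
        rcases mr_from ds acc x hx with h | ⟨t, ht, hxt⟩
        · exact hdacc x hxk h
        · exact hhd t ht x hxk hxt
      · exact ih acc htl k hk2
    · simp only [mergeRun, if_neg hd] at hk ⊢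
      exact ih _ htl k hk

theorem addB_from (comps : List (List String)) : ∀ (new : List String),
    ∀ k ∈ addB comps new, ∀ x ∈ k, x ∈ new ∨ ∃ c ∈ comps, x ∈ c := by
  induction comps with
  | nil =>
    intro new k hk x hx
    simp only [addB, List.mem_singleton] at hk
    subst hk
    exact Or.inl hx
  | cons c cs ih =>
    intro new k hk x hx
    by_cases hd : PySem.Set.isdisjoint c new = true
    · simp only [addB, if_pos hd] at hk
      rcases List.mem_cons.mp hk with rfl | hk2
      · exact Or.inr ⟨k, List.mem_cons_self, hx⟩
      · rcases ih new k hk2 x hx with h | ⟨c', hc', hxc'⟩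
        · exact Or.inl h
        · exact Or.inr ⟨c', List.mem_cons_of_mem _ hc', hxc'⟩
    · simp only [addB, if_neg hd] at hk
      rcases List.mem_cons.mp hk with rfl | hk2
      · rcases mr_from cs (PySem.Set.union c new) x hx with h | ⟨t, ht, hxt⟩
        · rcases (PySem.Set.mem_union c new x).mp h with h | h
          · exact Or.inr ⟨c, List.mem_cons_self, h⟩
          · exact Or.inl h
        · exact Or.inr ⟨t, List.mem_cons_of_mem _ ht, hxt⟩
      · exact Or.inr ⟨k, List.mem_cons_of_mem _ (mr_kept_mem cs _ k hk2), hx⟩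

theorem addB_disj (comps : List (List String)) : ∀ (new : List String),
    comps.Pairwise disjP → (addB comps new).Pairwise disjP := by
  induction comps with
  | nil => intro new _; simp [addB]
  | cons c cs ih =>
    intro new hpw
    rcases List.pairwise_cons.mp hpw with ⟨hhd, htl⟩
    by_cases hd : PySem.Set.isdisjoint c new = true
    · simp only [addB, if_pos hd]
      refine List.pairwise_cons.mpr ⟨?_, ih new htl⟩
      intro k hk x hxc hxk
      rcases addB_from cs new k hk x hxk with h | ⟨c', hc', hxc'⟩
      · rw [PySem.Set.isdisjoint_iff] at hd
        exact hd x hxc h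
      · exact hhd c' hc' x hxc hxc'
    · simp only [addB, if_neg hd]
      refine List.pairwise_cons.mpr ⟨?_, List.Pairwise.sublist (mr_kept_sublist cs _) htl⟩
      exact mr_disj_kept cs _ htl

theorem foldl_addB_disj (L : List (List String)) : ∀ (acc : List (List String)),
    acc.Pairwise disjP → (L.foldl addB acc).Pairwise disjP := by
  induction L with
  | nil => intro acc h; exact h
  | cons s L ih =>
    intro acc h
    simp only [List.foldl_cons]
    exact ih _ (addB_disj acc s h)

-- ---------- compsB is the identity on a pairwise-disjoint list ----------

theorem ab_id_of_disj (rest : List (List String)) : ∀ (comp : List String),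
    (∀ s ∈ rest, disjP comp s) → absorbB comp rest = (comp, rest, false) := by
  induction rest with
  | nil => intro comp _; rfl
  | cons s rest ih =>
    intro comp hall
    have hd : PySem.Set.isdisjoint comp s = true := by
      rw [PySem.Set.isdisjoint_iff]
      exact hall s List.mem_cons_self
    simp only [absorbB, if_pos hd]
    rw [ih comp (fun t ht => hall t (List.mem_cons_of_mem _ ht))]

theorem comps_fix (L : List (List String)) (h : L.Pairwise disjP) : compsB L = L := by
  induction L with
  | nil => rw [compsB]
  | cons c rest ih =>
    rcases List.pairwise_cons.mp h with ⟨hhd, htl⟩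
    rw [compsB_cons]
    have hcl : closeB c rest = (c, rest) := by
      rw [closeB]
      rw [ab_id_of_disj rest c hhd]
      simp
    rw [hcl]
    rw [ih htl]

-- ---------- facts about the canonical bucket list ----------

theorem comps_cover : ∀ (L : List (List String)), BInv L → ∀ s ∈ L, ∃ t ∈ compsB L, sSub s t := by
  intro L
  induction L using compsB.induct with
  | case1 =>
    intro _ s hs
    cases hs
  | case2 comp rest p ih =>
    intro hinv s hs
    rw [compsB_cons]
    rcases List.mem_cons.mp hs with rfl | hs2
    · exact ⟨(closeB s rest).1, List.mem_cons_self, cb_sub s rest⟩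
    · by_cases hd : PySem.Set.isdisjoint s (closeB comp rest).1 = true
      · have hrem := cb_rem comp rest (fun u hu => (hinv u (List.mem_cons_of_mem _ hu)).1)
        have hsrem : s ∈ (closeB comp rest).2 := by
          rw [hrem]
          exact List.mem_filter.mpr ⟨hs2, hd⟩
        have hbi : BInv (closeB comp rest).2 := fun t ht =>
          hinv t (List.mem_cons_of_mem _ (cb_rem_mem comp rest t ht))
        rcases ih hbi s hsrem with ⟨t, ht, hsub⟩
        exact ⟨t, List.mem_cons_of_mem _ ht, hsub⟩
      · have hd' := Bool.eq_false_iff.mpr hd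
        rcases (sdisj_false_iff _ _).mp hd' with ⟨y, hys, hyc⟩
        exact ⟨(closeB comp rest).1, List.mem_cons_self, cb_sat comp rest s hs2 ⟨y, hys, hyc⟩⟩

-- ---------- phase 2: keys, owner index, first-intersecting bucket ----------

theorem key_eq_of_sEq {a b : List String} (h : sEq a b) (na : a.Nodup) (nb : b.Nodup) :
    PySem.List.sorted a (fun x => x) = PySem.List.sorted b (fun x => x) :=
  PySem.List.sorted_eq_sorted_of_perm a b (fun x => x) (fun _ _ hx => hx)
    ((List.perm_ext_iff_of_nodup na nb).mpr h)

theorem keys_eq : ∀ {F G : List (List String)}, lEq F G → BInv F → BInv G →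
    List.Forall₂ (fun cA cB => PySem.List.sorted cA (fun x => x) = PySem.List.sorted cB (fun x => x)) F G := by
  intro F G h
  induction h with
  | nil => intro _ _; exact List.Forall₂.nil
  | @cons a b l1 l2 hs t ih =>
    intro hF hG
    exact List.Forall₂.cons
      (key_eq_of_sEq hs (hF a List.mem_cons_self).2 (hG b List.mem_cons_self).2)
      (ih (fun s hs' => hF s (List.mem_cons_of_mem _ hs'))
          (fun s hs' => hG s (List.mem_cons_of_mem _ hs')))

theorem fold2_eq {F G : List (List String)}
    (h : List.Forall₂ (fun cA cB => PySem.List.sorted cA (fun x => x) = PySem.List.sorted cB (fun x => x)) F G) :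
    ∀ (d0 : PySem.Dict (List String) (List String)),
    F.foldl (fun d scripts => d.insert (PySem.List.sorted scripts (fun x => x)) []) d0
      = G.foldl (fun d scripts => d.insert (PySem.List.sorted scripts (fun x => x)) []) d0 := by
  induction h with
  | nil => intro d0; rfl
  | cons hk t ih =>
    intro d0
    simp only [List.foldl_cons]
    rw [hk]
    exact ih _

theorem owner_inner (k : List String) : ∀ (comp : List String)
    (o : PySem.Dict String (List String)) (x : String),
    (comp.foldl (fun o' s => o'.insert s k) o).get? x = if x ∈ comp then some k else o.get? x := by
  intro comp
  induction comp with
  | nil => intro o x; simp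
  | cons s cs ih =>
    intro o x
    simp only [List.foldl_cons]
    rw [ih]
    by_cases hx : x ∈ cs
    · rw [if_pos hx, if_pos (List.mem_cons_of_mem _ hx)]
    · by_cases hxs : x = s
      · subst hxs
        rw [if_neg hx, if_pos List.mem_cons_self, PySem.Dict.get?_insert_self]
      · rw [if_neg hx, PySem.Dict.get?_insert_of_ne _ _ hxs,
          if_neg (by simp [List.mem_cons, hxs, hx])]

theorem owner_skip : ∀ (bs : List (List String)) (o : PySem.Dict String (List String)) (x : String),
    (∀ b ∈ bs, x ∉ b) →
    (bs.foldl (fun o c => c.foldl (fun o' script => o'.insert script (PySem.List.sorted c (fun x => x))) o) o).get? x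
      = o.get? x := by
  intro bs
  induction bs with
  | nil => intro o x _; rfl
  | cons c bs ih =>
    intro o x hnot
    simp only [List.foldl_cons]
    rw [ih _ x (fun b hb => hnot b (List.mem_cons_of_mem _ hb))]
    rw [owner_inner, if_neg (hnot c List.mem_cons_self)]

theorem owner_get : ∀ (buckets : List (List String)) (o0 : PySem.Dict String (List String))
    (t : List String) (x : String),
    buckets.Pairwise disjP → t ∈ buckets → x ∈ t →
    (buckets.foldl (fun o c => c.foldl (fun o' script => o'.insert script (PySem.List.sorted c (fun x => x))) o) o0).get? x
      = some (PySem.List.sorted t (fun x => x)) := by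
  intro buckets
  induction buckets with
  | nil => intro o0 t x _ ht _; cases ht
  | cons c bs ih =>
    intro o0 t x hpw ht hx
    simp only [List.foldl_cons]
    by_cases hxc : x ∈ c
    · have ht' : t = c := by
        rcases List.mem_cons.mp ht with h | htl
        · exact h
        · exact absurd hx ((List.pairwise_cons.mp hpw).1 t htl x hxc)
      subst ht'
      rw [owner_skip bs _ x (fun b' hb' hxb' => ((List.pairwise_cons.mp hpw).1 b' hb' x hxc) hxb')]
      rw [owner_inner, if_pos hxc]
    · have htl : t ∈ bs := by
        rcases List.mem_cons.mp ht with h | htl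
        · subst h; exact absurd hx hxc
        · exact htl
      exact ih _ t x (List.pairwise_cons.mp hpw).2 htl hx

theorem isEmpty_false_of_mem {l : List String} {x : String} (hx : x ∈ l) : l.isEmpty = false := by
  cases l
  · cases hx
  · rfl

theorem inter_empty_of_disj {c scr : List String} (h : ∀ x ∈ c, x ∉ scr) :
    (PySem.Set.inter c (PySem.Set.ofList scr)).isEmpty = true := by
  have he : PySem.Set.inter c (PySem.Set.ofList scr) = [] := by
    apply List.eq_nil_iff_forall_not_mem.mpr
    intro x hx
    rcases (PySem.Set.mem_inter c _ x).mp hx with ⟨h1, h2⟩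
    exact h x h1 ((PySem.Set.mem_ofList scr x).mp h2)
  rw [he]
  rfl

theorem findA_nil_key : ∀ (F : List (List String)), findA F [] = none := by
  intro F
  induction F with
  | nil => rfl
  | cons c rest ih =>
    have hc : (PySem.Set.inter c (PySem.Set.ofList ([] : List String))).isEmpty = true :=
      inter_empty_of_disj (fun x _ hx => by cases hx)
    simp only [findA]
    rw [if_pos hc]
    exact ih

theorem findA_eq : ∀ {F G : List (List String)}, lEq F G → BInv F → BInv G → G.Pairwise disjP →
    ∀ (scr t : List String), t ∈ G → sSub scr t → scr ≠ [] →
    findA F scr = some (PySem.List.sorted t (fun x => x)) := by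
  intro F G h
  induction h with
  | nil => intro _ _ _ scr t ht _ _; cases ht
  | @cons cA cB F' G' hs htail ih =>
    intro hF hG hpw scr t ht hsub hne
    rcases List.exists_mem_of_ne_nil scr hne with ⟨x0, hx0⟩
    rcases List.mem_cons.mp ht with rfl | htl
    · have hx0A : x0 ∈ cA := (hs x0).mpr (hsub x0 hx0)
      have hmem : x0 ∈ PySem.Set.inter cA (PySem.Set.ofList scr) :=
        (PySem.Set.mem_inter _ _ _).mpr ⟨hx0A, (PySem.Set.mem_ofList _ _).mpr hx0⟩
      simp only [findA]
      rw [if_neg (by simp [isEmpty_false_of_mem hmem])]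
      exact congrArg some
        (key_eq_of_sEq hs (hF cA List.mem_cons_self).2 (hG _ List.mem_cons_self).2)
    · have hdisj : disjP cB t := (List.pairwise_cons.mp hpw).1 t htl
      have hno : ∀ x ∈ cA, x ∉ scr := fun x hxA hxscr =>
        hdisj x ((hs x).mp hxA) (hsub x hxscr)
      simp only [findA]
      rw [if_pos (inter_empty_of_disj hno)]
      exact ih (fun s h' => hF s (List.mem_cons_of_mem _ h'))
        (fun s h' => hG s (List.mem_cons_of_mem _ h'))
        (List.pairwise_cons.mp hpw).2 scr t htl hsub hne

-- ---------- final assembly ----------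

theorem sets0_binv (kps : List (List String × List String)) :
    BInv (kps.filterMap (fun e => if e.1.isEmpty then none else some (PySem.Set.ofList e.1))) := by
  intro s hs
  rcases List.mem_filterMap.mp hs with ⟨e, he, hsome⟩
  by_cases hne : e.1.isEmpty
  · rw [if_pos hne] at hsome
    cases hsome
  · rw [if_neg hne] at hsome
    cases hsome
    constructor
    · intro hnil
      have hne' : e.1 ≠ [] := by simpa using hne
      rcases List.exists_mem_of_ne_nil e.1 hne' with ⟨x, hx⟩
      have hx' := (PySem.Set.mem_ofList e.1 x).mpr hx
      rw [hnil] at hx'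
      cases hx'
    · exact PySem.Set.nodup_ofList e.1

theorem main_eq (kps : List (List String × List String)) :
    mergeScripts kps = mergeScripts_alt kps := by
  simp only [mergeScripts, mergeScripts_alt]
  set S := kps.filterMap (fun e => if e.1.isEmpty then none else some (PySem.Set.ofList e.1)) with hS
  have hSinv : BInv S := sets0_binv kps
  rw [foldB_filterMap, ← hS]
  set G := S.foldl addB [] with hG
  have hRTG : Relation.ReflTransGen Step S G := by
    have h := rtg_foldl_addB S []
    simpa using h
  have hGinv : BInv G := rtg_binv hRTG hSinv
  have hGd : G.Pairwise disjP := foldl_addB_disj S [] List.Pairwise.nil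
  have hGfix : compsB G = G := comps_fix G hGd
  have hGC : lEq G (compsB S) := by
    have h := rtg_comps hRTG hSinv
    rwa [hGfix] at h
  have hFinv : BInv (loopA S) := rtg_binv (loopA_rtg S) hSinv
  have hFG : lEq (loopA S) G := lEq_trans (loopA_comps S hSinv) (lEq_symm hGC)
  have hinit : (loopA S).foldl (fun d scripts => d.insert (PySem.List.sorted scripts (fun x => x)) []) PySem.Dict.empty
      = G.foldl (fun d c => d.insert (PySem.List.sorted c (fun x => x)) []) PySem.Dict.empty :=
    fold2_eq (keys_eq hFG hFinv hGinv) PySem.Dict.empty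
  rw [hinit]
  refine congrArg PySem.Dict.items (PySem.List.foldl_congr_mem kps _ _ _ ?_)
  intro d e he
  rcases e with ⟨scr, prs⟩
  dsimp only
  cases scr with
  | nil =>
    rw [findA_nil_key]
    have h0 : PySem.List.pyGet? ([] : List String) (0 : Int) = none := by decide
    rw [h0]
  | cons s0 tl =>
    have hmemS : PySem.Set.ofList (s0 :: tl) ∈ S := by
      rw [hS]
      exact List.mem_filterMap.mpr ⟨(s0 :: tl, prs), he, by simp⟩
    rcases comps_cover S hSinv _ hmemS with ⟨tC, htC, hsubC⟩
    rcases lEq_mem hGC htC with ⟨t, htG, hte⟩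
    have hsubT : sSub (PySem.Set.ofList (s0 :: tl)) t := fun x hx => (hte x).mpr (hsubC x hx)
    have hsub : sSub (s0 :: tl) t := fun x hx => hsubT x ((PySem.Set.mem_ofList _ x).mpr hx)
    have hfind := findA_eq hFG hFinv hGinv hGd (s0 :: tl) t htG hsub (by simp)
    have hget0 : PySem.List.pyGet? (s0 :: tl) (0 : Int) = some s0 := by
      simp [PySem.List.pyGet?, PySem.List.pyIdx?]
    have howner : (G.foldl (fun o c =>
            c.foldl (fun o' script => o'.insert script (PySem.List.sorted c (fun x => x))) o)
            PySem.Dict.empty).get? s0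
        = some (PySem.List.sorted t (fun x => x)) :=
      owner_get G PySem.Dict.empty t s0 hGd htG (hsub s0 List.mem_cons_self)
    rw [hfind, hget0]
    dsimp only
    rw [howner]

-- ===== VERDICT (by name: the statement is the Claim_ definition above) =====
theorem mergeScripts_spec : Claim_equal_mergeScripts := by
  intro kps _ _
  unfold Spec_mergeScripts
  exact main_eq kps
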